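-- pv_equiv track=rewrite | github.com/Changwanseo/FunVIP | funip/src/logics.py | isnewicklegal
-- ===== SOURCE A (Python) =====
-- def isnewicklegal(string: str) -> bool:
--     """
--     if string is newick legal -> return True
--     if string is newick illegal -> return False
--     """
--     NEWICK_ILLEGAL = (
--         "(",
--         '"',
--         "[",
--         ":",
--         ";",
--         "/",
--         "[",
--         "]",
--         "{",
--         "}",
--         "(",
--         ")",
--         ",",
--         "]",
--         "+",
--         '"',
--         ")",
--         " ",
--     )
--
--     if any(x in string for x in NEWICK_ILLEGAL):
--         return True
--     else:
--         return False
-- ===== SOURCE B (Python) =====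
-- _ILLEGAL = frozenset('("[:;/]{}),+ ')
--
-- def isnewicklegal(string: str) -> bool:
--     for c in string:
--         if c in _ILLEGAL:
--             return True
--     return False
-- ===== Notes on version B (the rewrite author's own statement) =====
-- stated objective: idiomatic
-- what changed: B iterates over the characters of the input with O(1) frozenset membership and returns on the first illegal character, instead of A's scan over 18 illegal tokens each doing a substring search of the whole string.
import Mathlib
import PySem

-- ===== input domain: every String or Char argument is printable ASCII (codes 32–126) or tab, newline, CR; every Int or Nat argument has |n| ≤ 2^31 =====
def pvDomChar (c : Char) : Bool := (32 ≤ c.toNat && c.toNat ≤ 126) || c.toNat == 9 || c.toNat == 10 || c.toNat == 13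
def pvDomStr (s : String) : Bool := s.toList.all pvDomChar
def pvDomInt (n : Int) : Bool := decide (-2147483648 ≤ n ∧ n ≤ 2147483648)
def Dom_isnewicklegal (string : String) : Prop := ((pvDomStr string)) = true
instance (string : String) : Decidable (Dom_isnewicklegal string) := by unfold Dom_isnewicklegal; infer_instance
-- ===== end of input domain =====

-- B scans the input characters once with set membership instead of scanning 18 illegal tokens through the whole string (idiomatic).
-- ===== PORT A =====
def NEWICK_ILLEGAL : List String :=
  ["(", "\"", "[", ":", ";", "/", "[", "]", "{", "}", "(", ")", ",", "]", "+", "\"", ")", " "]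

def isnewicklegal (string : String) : Bool :=
  if NEWICK_ILLEGAL.any (fun x => PySem.Str.isIn x string) then true else false

-- ===== PORT B =====
def illegalChars : List Char :=
  ['(', '"', '[', ':', ';', '/', ']', '{', '}', ')', ',', '+', ' ']

def isnewicklegal_alt (string : String) : Bool :=
  string.toList.any (fun c => illegalChars.contains c)

-- ===== PRECONDITION & SPEC =====
def Spec_isnewicklegal (string : String) (out : Bool) : Prop := out = isnewicklegal_alt string
instance (string : String) (out : Bool) : Decidable (Spec_isnewicklegal string out) := by unfold Spec_isnewicklegal; infer_instance

-- ===== CLAIM (what is proved, stated in full; the proofs are below) =====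
def Claim_equal_isnewicklegal : Prop := ∀ (string : String), Dom_isnewicklegal string → Spec_isnewicklegal string (isnewicklegal string)

-- ===== LEMMAS AND PROOFS =====

-- ===== VERDICT (by name: the statement is the Claim_ definition above) =====
theorem singleton_infix_iff_mem {a : Char} {l : List Char} : [a] <:+: l ↔ a ∈ l := by
  constructor
  · intro h
    exact List.singleton_sublist.mp h.sublist
  · intro h
    obtain ⟨s, t, rfl⟩ := List.append_of_mem h
    exact ⟨s, t, by simp⟩

theorem isnewicklegal_spec : Claim_equal_isnewicklegal := by
  intro s _
  unfold Spec_isnewicklegal isnewicklegal isnewicklegal_alt NEWICK_ILLEGAL illegalChars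
  rw [Bool.eq_iff_iff]
  simp only [Bool.if_true_left, Bool.or_false, List.any_eq_true, PySem.Str.isIn_iff_infix,
    List.contains_eq_mem, decide_eq_true_eq]
  constructor
  · rintro ⟨x, hx, hinf⟩
    fin_cases hx <;>
    first
      | exact ⟨'(', singleton_infix_iff_mem.mp hinf, by decide⟩
      | exact ⟨'\"', singleton_infix_iff_mem.mp hinf, by decide⟩
      | exact ⟨'[', singleton_infix_iff_mem.mp hinf, by decide⟩
      | exact ⟨':', singleton_infix_iff_mem.mp hinf, by decide⟩
      | exact ⟨';', singleton_infix_iff_mem.mp hinf, by decide⟩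
      | exact ⟨'/', singleton_infix_iff_mem.mp hinf, by decide⟩
      | exact ⟨']', singleton_infix_iff_mem.mp hinf, by decide⟩
      | exact ⟨'{', singleton_infix_iff_mem.mp hinf, by decide⟩
      | exact ⟨'}', singleton_infix_iff_mem.mp hinf, by decide⟩
      | exact ⟨')', singleton_infix_iff_mem.mp hinf, by decide⟩
      | exact ⟨',', singleton_infix_iff_mem.mp hinf, by decide⟩
      | exact ⟨'+', singleton_infix_iff_mem.mp hinf, by decide⟩
      | exact ⟨' ', singleton_infix_iff_mem.mp hinf, by decide⟩

  · rintro ⟨c, hc, hmem⟩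
    fin_cases hmem <;>
    first
      | exact ⟨"(", by decide, singleton_infix_iff_mem.mpr hc⟩
      | exact ⟨"\"", by decide, singleton_infix_iff_mem.mpr hc⟩
      | exact ⟨"[", by decide, singleton_infix_iff_mem.mpr hc⟩
      | exact ⟨":", by decide, singleton_infix_iff_mem.mpr hc⟩
      | exact ⟨";", by decide, singleton_infix_iff_mem.mpr hc⟩
      | exact ⟨"/", by decide, singleton_infix_iff_mem.mpr hc⟩
      | exact ⟨"]", by decide, singleton_infix_iff_mem.mpr hc⟩
      | exact ⟨"{", by decide, singleton_infix_iff_mem.mpr hc⟩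
      | exact ⟨"}", by decide, singleton_infix_iff_mem.mpr hc⟩
      | exact ⟨")", by decide, singleton_infix_iff_mem.mpr hc⟩
      | exact ⟨",", by decide, singleton_infix_iff_mem.mpr hc⟩
      | exact ⟨"+", by decide, singleton_infix_iff_mem.mpr hc⟩
      | exact ⟨" ", by decide, singleton_infix_iff_mem.mpr hc⟩
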